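-- pv_equiv track=rewrite | github.com/aMoniker/daily-kata | euler/033.py | find_common_digit
-- ===== SOURCE A (Python) =====
-- from typing import Dict, Optional
--
-- def find_common_digit(x: int, y: int) -> Optional[int]:
--     digits: Dict[str, bool] = {}
--     for c in str(x):
--         if not c in digits:
--             digits[c] = True
--     for c in str(y):
--         if c in digits:
--             return int(c)
--     return None
-- ===== SOURCE B (Python) =====
-- from typing import Optional
--
-- def find_common_digit(x: int, y: int) -> Optional[int]:
--     sy = str(y)
--     best = -1
--     for c in str(x):
--         i = sy.find(c)
--         if i != -1 and (best == -1 or i < best):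
--             best = i
--     if best == -1:
--         return None
--     return int(sy[best])
-- ===== Notes on version B (the rewrite author's own statement) =====
-- stated objective: alternative
-- what changed: B inverts the traversal: instead of A's build-a-membership-dict-from-str(x)-then-scan-str(y), B makes one pass over str(x) taking the minimum of sy.find(c) over x's characters present in str(y), then returns int(sy[best]); correct because the first y-character occurring in x sits at exactly that minimal first-occurrence position.
import Mathlib
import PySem

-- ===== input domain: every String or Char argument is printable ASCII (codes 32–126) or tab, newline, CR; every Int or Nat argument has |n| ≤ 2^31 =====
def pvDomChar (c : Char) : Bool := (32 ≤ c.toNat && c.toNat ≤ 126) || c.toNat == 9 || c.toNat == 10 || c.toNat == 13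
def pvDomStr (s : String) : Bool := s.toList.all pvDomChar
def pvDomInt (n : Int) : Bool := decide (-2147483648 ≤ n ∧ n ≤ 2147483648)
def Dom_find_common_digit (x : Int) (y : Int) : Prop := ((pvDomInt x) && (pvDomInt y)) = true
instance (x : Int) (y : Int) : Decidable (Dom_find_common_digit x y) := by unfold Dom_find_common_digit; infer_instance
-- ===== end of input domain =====

-- B replaces A's build-a-digit-dict-then-scan-y with a different algorithm: one pass over str(x)
-- tracking the minimal first-occurrence position of each of x's characters in str(y) via str.find,
-- then reading the character of str(y) at that minimal position (objective: alternative).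


-- ===== PORT A =====
-- second loop of A: scan str(y), returning int(c) at the first c present in the dict
def pvScanDict (d : PySem.Dict Char Bool) : List Char → Option Int
  | [] => none
  | c :: cs => if d.contains c then PySem.Int.ofChars? [c] else pvScanDict d cs

def find_common_digit (x : Int) (y : Int) : Option Int :=
  let digits : PySem.Dict Char Bool :=
    (PySem.Int.toChars x).foldl
      (fun d c => if d.contains c then d else d.insert c true) PySem.Dict.empty
  pvScanDict digits (PySem.Int.toChars y)

-- ===== PORT B =====
-- B's loop: over str(x), keep the least sy.find(c) that is not -1 (best = -1 means "none yet")
def find_common_digit_alt (x : Int) (y : Int) : Option Int :=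
  let sy := PySem.Int.toChars y
  let best := (PySem.Int.toChars x).foldl
    (fun best c =>
      let i := PySem.Chars.find sy [c]
      if i ≠ -1 ∧ (best = -1 ∨ i < best) then i else best) (-1)
  if best = -1 then none
  else (PySem.List.pyGet? sy best).bind (fun c => PySem.Int.ofChars? [c])

-- ===== PRECONDITION & SPEC =====
-- Pre_ excludes x < 0 ∧ y < 0: there the shared character '-' is selected by both and both raise ValueError on int('-').
def Pre_find_common_digit (x : Int) (y : Int) : Prop := 0 ≤ x ∨ 0 ≤ y
instance (x : Int) (y : Int) : Decidable (Pre_find_common_digit x y) := by unfold Pre_find_common_digit; infer_instance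
def pvWitness_find_common_digit : Int × Int := (12, 25)

def Spec_find_common_digit (x : Int) (y : Int) (out : Option Int) : Prop := out = find_common_digit_alt x y
instance (x : Int) (y : Int) (out : Option Int) : Decidable (Spec_find_common_digit x y out) := by unfold Spec_find_common_digit; infer_instance

-- ===== CLAIM (what is proved, stated in full; the proofs are below) =====
def Claim_equal_find_common_digit : Prop := ∀ (x : Int) (y : Int), Dom_find_common_digit x y → Pre_find_common_digit x y → Spec_find_common_digit x y (find_common_digit x y)

-- ===== LEMMAS AND PROOFS =====

-- membership in A's conditionally-built dict is membership in the list of characters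
theorem pv_contains_fold (l : List Char) (d : PySem.Dict Char Bool) (c : Char) :
    ((l.foldl (fun d c => if d.contains c then d else d.insert c true) d).contains c)
      = (d.contains c || l.contains c) := by
  induction l generalizing d with
  | nil => simp
  | cons a l ih =>
      simp only [List.foldl_cons, List.contains_cons]
      by_cases h : d.contains a
      · simp [h, ih]
        by_cases hca : (c == a) = true
        · simp [(by simpa using hca : c = a), h]
        · simp [hca]
      · simp [h, ih, PySem.Dict.contains_insert]
        by_cases hca : (c == a) = true
        · simp [hca]
        · simp [hca]

-- a one-character pattern is a prefix of a drop iff that position carries the character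
theorem pv_singleton_prefix_drop (c : Char) (l : List Char) (k : Nat) (h : k < l.length) :
    [c] <+: l.drop k ↔ l[k] = c := by
  rw [List.drop_eq_getElem_cons h]
  constructor
  · intro hp
    have := List.prefix_cons_iff.mp hp
    simp at this
    exact this.symm
  · intro he
    exact ⟨List.drop (k + 1) l, by rw [he]; rfl⟩

-- characterisation of str.find for a single character: it is the least index carrying c
theorem pv_find_char_eq (sy : List Char) (c : Char) (k : Nat) (hk : k < sy.length)
    (hc : sy[k] = c) (hmin : ∀ j (hj : j < k), sy[j] ≠ c) :
    PySem.Chars.find sy [c] = (k : Int) := by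
  have hne : PySem.Chars.find sy [c] ≠ -1 := by
    rw [Ne, PySem.Chars.find_eq_neg_one_iff, List.singleton_infix_iff]
    intro hmem
    exact hmem (hc ▸ List.getElem_mem hk)
  have h0 : 0 ≤ PySem.Chars.find sy [c] := by
    have := PySem.Chars.neg_one_le_find sy [c]; omega
  obtain ⟨hpre, hleast⟩ := PySem.Chars.find_spec h0
  set m := (PySem.Chars.find sy [c]).toNat with hm
  have hmlt : m < sy.length := by
    have hle := PySem.Chars.find_le_length sy [c]
    rcases Nat.lt_or_ge m sy.length with h | h
    · exact h
    · exfalso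
      have : sy.drop m = [] := List.drop_eq_nil_of_le h
      rw [this] at hpre
      exact absurd (List.prefix_nil.mp hpre) (by simp)
  have hcm : sy[m] = c := (pv_singleton_prefix_drop c sy m hmlt).mp hpre
  have hkm : ¬ k < m := fun hlt =>
    hleast k hlt ((pv_singleton_prefix_drop c sy k hk).mpr hc)
  have hmk : ¬ m < k := fun hlt => hmin m hlt hcm
  have : m = k := by omega
  omega

-- find sy [c] = -1 exactly when c does not occur in sy
theorem pv_find_char_neg (sy : List Char) (c : Char) (h : c ∉ sy) :
    PySem.Chars.find sy [c] = -1 := by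
  rw [PySem.Chars.find_eq_neg_one_iff, List.singleton_infix_iff]
  exact h

-- B's fold, abstracted
def pvCombine (sy : List Char) (best : Int) (c : Char) : Int :=
  if PySem.Chars.find sy [c] ≠ -1 ∧ (best = -1 ∨ PySem.Chars.find sy [c] < best)
  then PySem.Chars.find sy [c] else best

theorem pv_fold_mono (sy : List Char) (l : List Char) (b : Int) (hb : b ≠ -1) :
    l.foldl (pvCombine sy) b ≠ -1 ∧ l.foldl (pvCombine sy) b ≤ b := by
  induction l generalizing b with
  | nil => exact ⟨hb, le_refl b⟩
  | cons c cs ih =>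
      rw [List.foldl_cons]
      by_cases h : PySem.Chars.find sy [c] ≠ -1 ∧ (b = -1 ∨ PySem.Chars.find sy [c] < b)
      · rw [show pvCombine sy b c = PySem.Chars.find sy [c] from if_pos h]
        obtain ⟨hne, hlt⟩ := h
        obtain ⟨h1, h2⟩ := ih _ hne
        rcases hlt with h | h
        · exact absurd h hb
        · exact ⟨h1, le_trans h2 (le_of_lt h)⟩
      · rw [show pvCombine sy b c = b from if_neg h]
        exact ih b hb

theorem pv_fold_shape (sy : List Char) (l : List Char) (b : Int) :
    l.foldl (pvCombine sy) b = b ∨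
      ∃ c ∈ l, l.foldl (pvCombine sy) b = PySem.Chars.find sy [c]
        ∧ PySem.Chars.find sy [c] ≠ -1 := by
  induction l generalizing b with
  | nil => exact Or.inl rfl
  | cons c cs ih =>
      rw [List.foldl_cons]
      by_cases h : PySem.Chars.find sy [c] ≠ -1 ∧ (b = -1 ∨ PySem.Chars.find sy [c] < b)
      · rw [show pvCombine sy b c = PySem.Chars.find sy [c] from if_pos h]
        rcases ih (PySem.Chars.find sy [c]) with h1 | ⟨c', hc', h2, h3⟩
        · exact Or.inr ⟨c, List.mem_cons_self, h1, h.1⟩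
        · exact Or.inr ⟨c', List.mem_cons_of_mem _ hc', h2, h3⟩
      · rw [show pvCombine sy b c = b from if_neg h]
        rcases ih b with h1 | ⟨c', hc', h2, h3⟩
        · exact Or.inl h1
        · exact Or.inr ⟨c', List.mem_cons_of_mem _ hc', h2, h3⟩

theorem pv_fold_bound (sy : List Char) (l : List Char) (b : Int) (c : Char)
    (hc : c ∈ l) (hne : PySem.Chars.find sy [c] ≠ -1) :
    l.foldl (pvCombine sy) b ≠ -1 ∧
      l.foldl (pvCombine sy) b ≤ PySem.Chars.find sy [c] := by
  induction l generalizing b with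
  | nil => cases hc
  | cons a cs ih =>
      rw [List.foldl_cons]
      rcases List.mem_cons.mp hc with rfl | hmem
      · have hstep : pvCombine sy b c ≠ -1 ∧ pvCombine sy b c ≤ PySem.Chars.find sy [c] := by
          by_cases h : PySem.Chars.find sy [c] ≠ -1 ∧ (b = -1 ∨ PySem.Chars.find sy [c] < b)
          · rw [show pvCombine sy b c = PySem.Chars.find sy [c] from if_pos h]
            exact ⟨h.1, le_refl _⟩
          · rw [show pvCombine sy b c = b from if_neg h]
            have h' : ¬ (b = -1 ∨ PySem.Chars.find sy [c] < b) := fun hb => h ⟨hne, hb⟩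
            have hb1 : b ≠ -1 := fun hb => h' (Or.inl hb)
            have hb2 : ¬ PySem.Chars.find sy [c] < b := fun hb => h' (Or.inr hb)
            exact ⟨hb1, le_of_not_gt hb2⟩
        by_cases hc2 : c ∈ cs
        · exact ih _ hc2
        · obtain ⟨h1, h2⟩ := pv_fold_mono sy cs _ hstep.1
          exact ⟨h1, le_trans h2 hstep.2⟩
      · exact ih _ hmem

-- A's scan over str(y) against an arbitrary membership test given as a Bool-valued predicate
theorem pv_scan_dict_eq_findIdx (d : PySem.Dict Char Bool) (l : List Char) :
    pvScanDict d l = match l.findIdx? (fun c => d.contains c) with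
      | none => none
      | some j => l[j]?.bind (fun c => PySem.Int.ofChars? [c]) := by
  induction l with
  | nil => rfl
  | cons c cs ih =>
      rw [pvScanDict, List.findIdx?_cons]
      by_cases h : d.contains c
      · simp [h]
      · simp only [h, Bool.false_eq_true, if_false, ih]
        cases hfi : cs.findIdx? (fun c => d.contains c) with
        | none => simp
        | some j => simp

-- ===== VERDICT (by name: the statement is the Claim_ definition above) =====
theorem find_common_digit_spec : Claim_equal_find_common_digit := by
  intro x y _ _
  unfold Spec_find_common_digit find_common_digit find_common_digit_alt
  simp only []
  set sx := PySem.Int.toChars x with hsx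
  set sy := PySem.Int.toChars y with hsy
  rw [pv_scan_dict_eq_findIdx]
  have hcontains : ∀ c, ((sx.foldl (fun d c => if d.contains c then d else d.insert c true)
      PySem.Dict.empty).contains c) = sx.contains c := fun c => by
    simp [pv_contains_fold]
  have hfold : (sx.foldl (fun best c =>
      let i := PySem.Chars.find sy [c]
      if i ≠ -1 ∧ (best = -1 ∨ i < best) then i else best) (-1 : Int))
      = sx.foldl (pvCombine sy) (-1) := by
    rfl
  rw [hfold]
  cases hfi : sy.findIdx? (fun c =>
      (sx.foldl (fun d c => if d.contains c then d else d.insert c true)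
        PySem.Dict.empty).contains c) with
  | none =>
      -- no character of sy is in sx ⇒ every find is -1 ⇒ the fold stays -1
      have hnone : ∀ c ∈ sy, sx.contains c = false := by
        intro c hc
        have := List.findIdx?_eq_none_iff.mp hfi c hc
        rwa [hcontains] at this
      have hfind : ∀ c ∈ sx, PySem.Chars.find sy [c] = -1 := by
        intro c hc
        apply pv_find_char_neg
        intro hmem
        have := hnone c hmem
        simp at this
        exact this hc
      have : sx.foldl (pvCombine sy) (-1) = -1 := by
        rcases pv_fold_shape sy sx (-1) with h | ⟨c, hc, _, h3⟩
        · exact h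
        · exact absurd (hfind c hc) h3
      simp [this]
  | some j =>
      obtain ⟨hj, hpj, hminj⟩ := List.findIdx?_eq_some_iff_getElem.mp hfi
      rw [hcontains] at hpj
      have hpj' : sy[j] ∈ sx := by simpa using hpj
      have hminj' : ∀ i (hi : i < j), sy[i] ∉ sx := by
        intro i hi hmem
        have := hminj i hi
        rw [hcontains] at this
        exact this (by simpa using hmem)
      -- find sy [sy[j]] = j : first occurrence of sy[j] is j itself
      have hfj : PySem.Chars.find sy [sy[j]] = (j : Int) := by
        apply pv_find_char_eq sy sy[j] j hj rfl
        intro i hi heq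
        exact hminj' i hi (heq ▸ hpj')
      have hfjne : PySem.Chars.find sy [sy[j]] ≠ -1 := by rw [hfj]; omega
      obtain ⟨hr1, hr2⟩ := pv_fold_bound sy sx (-1) sy[j] hpj' hfjne
      rw [hfj] at hr2
      -- the fold's result r is some find value ≥ 0, whose position carries a char of sx ⇒ j ≤ r
      rcases pv_fold_shape sy sx (-1) with h | ⟨c, hc, h2, h3⟩
      · exact absurd h hr1
      · have h0 : 0 ≤ PySem.Chars.find sy [c] := by
          have := PySem.Chars.neg_one_le_find sy [c]; omega
        obtain ⟨hpre, _⟩ := PySem.Chars.find_spec h0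
        set m := (PySem.Chars.find sy [c]).toNat with hm
        have hmlt : m < sy.length := by
          rcases Nat.lt_or_ge m sy.length with h' | h'
          · exact h'
          · exfalso
            have : sy.drop m = [] := List.drop_eq_nil_of_le h'
            rw [this] at hpre
            exact absurd (List.prefix_nil.mp hpre) (by simp)
        have hcm : sy[m] = c := (pv_singleton_prefix_drop c sy m hmlt).mp hpre
        have hjm : ¬ m < j := fun hlt => hminj' m hlt (hcm ▸ hc)
        -- so j ≤ m and r = m, with r ≤ j from the bound: r = j
        have hrval : sx.foldl (pvCombine sy) (-1) = (m : Int) := by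
          rw [h2]; omega
        have hrj : sx.foldl (pvCombine sy) (-1) = (j : Int) := by
          rw [hrval]
          have : (j : Int) ≤ m := by omega
          have : m = j := by
            have := hrval ▸ hr2
            omega
          simp [this]
        rw [hrj]
        have hjne : (j : Int) ≠ -1 := by omega
        simp only [hjne, if_false, PySem.List.pyGet?_natCast]
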